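-- pv_equiv track=rewrite | github.com/AarushSharma12/k-in-a-row-forbidden-squares | src/winTesterForK.py | _check_full_board
-- ===== SOURCE A (Python) =====
-- def _is_board_full(board):
--     """
--     Check if all board positions are occupied.
--
--     Args:
--         board: The game board (2D list).
--
--     Returns:
--         bool: True if no empty spaces remain.
--     """
--     for row in board:
--         for cell in row:
--             if cell == ' ' or cell == '-':
--                 return False
--     return True
--
-- def _check_full_board(board, k):
--     """
--     Scan entire board for win condition (used when no specific move given).
--
--     Args:
--         board: The game board (2D list).
--         k: Number in a row needed to win.
--
--     Returns:
--         str or None: 'X', 'O', 'draw', or None.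
--     """
--     rows = len(board)
--     cols = len(board[0]) if rows > 0 else 0
--
--     for player in ['X', 'O']:
--         for row in range(rows):
--             for col in range(cols):
--                 if board[row][col] == player:
--                     # Check horizontal
--                     if col + k <= cols:
--                         if all(board[row][col + i] == player for i in range(k)):
--                             return player
--
--                     # Check vertical
--                     if row + k <= rows:
--                         if all(board[row + i][col] == player for i in range(k)):
--                             return player
--
--                     # Check diagonal
--                     if row + k <= rows and col + k <= cols:
--                         if all(board[row + i][col + i] == player for i in range(k)):
--                             return player
--
--                     # Check anti-diagonal
--                     if row + k <= rows and col - k + 1 >= 0: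
--                         if all(board[row + i][col - i] == player for i in range(k)):
--                             return player
--
--     if _is_board_full(board):
--         return 'draw'
--
--     return None
-- ===== SOURCE B (Python) =====
-- def _check_full_board(board, k):
--     """Single-pass run-length DP: track consecutive counts in the four
--     directions per cell and per-player win flags, instead of testing a
--     k-window at every cell."""
--     rows = len(board)
--     cols = len(board[0]) if rows > 0 else 0
--     xwin = False
--     owin = False
--     full = True
--     vert = [("", 0)] * cols
--     diag = [("", 0)] * cols
--     adiag = [("", 0)] * cols
--     for row in board:
--         nvert = []
--         ndiag = []
--         nadiag = []
--         hown, hlen = "", 0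
--         for c in range(cols):
--             v = row[c]
--             if v == 'X' or v == 'O':
--                 hlen = hlen + 1 if hown == v else 1
--                 hown = v
--                 vl = vert[c][1] + 1 if vert[c][0] == v else 1
--                 dl = diag[c - 1][1] + 1 if c > 0 and diag[c - 1][0] == v else 1
--                 al = adiag[c + 1][1] + 1 if c + 1 < cols and adiag[c + 1][0] == v else 1
--                 nvert.append((v, vl))
--                 ndiag.append((v, dl))
--                 nadiag.append((v, al))
--                 if max(hlen, vl, dl, al) >= k:
--                     if v == 'X':
--                         xwin = True
--                     else:
--                         owin = True
--             else:
--                 hown, hlen = "", 0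
--                 nvert.append(("", 0))
--                 ndiag.append(("", 0))
--                 nadiag.append(("", 0))
--         for v in row:
--             if v == ' ' or v == '-':
--                 full = False
--         vert, diag, adiag = nvert, ndiag, nadiag
--     if xwin:
--         return 'X'
--     if owin:
--         return 'O'
--     return 'draw' if full else None
-- ===== Notes on version B (the rewrite author's own statement) =====
-- stated objective: alternative
-- what changed: Replaces A's per-cell scan that re-tests a full k-window in four directions from every occupied cell by a single row-major pass keeping running consecutive-run lengths (horizontal, vertical, diagonal, anti-diagonal) and per-player win flags.
-- outside the precondition, e.g. on _check_full_board([['X', 'X', 'a-'], [], ['c', 'O']], 0): A returns 'X', B raises IndexError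
import Mathlib
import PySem

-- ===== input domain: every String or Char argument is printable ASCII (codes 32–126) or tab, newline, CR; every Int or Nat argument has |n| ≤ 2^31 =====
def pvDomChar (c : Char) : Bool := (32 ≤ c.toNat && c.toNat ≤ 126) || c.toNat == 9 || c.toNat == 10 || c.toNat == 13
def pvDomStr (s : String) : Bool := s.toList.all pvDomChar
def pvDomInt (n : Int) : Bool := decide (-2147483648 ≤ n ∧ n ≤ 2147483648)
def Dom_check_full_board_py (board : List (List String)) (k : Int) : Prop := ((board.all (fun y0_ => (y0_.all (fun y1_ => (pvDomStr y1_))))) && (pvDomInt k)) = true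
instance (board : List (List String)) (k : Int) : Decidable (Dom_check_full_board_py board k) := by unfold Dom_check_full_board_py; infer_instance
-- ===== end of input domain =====

-- B replaces A's per-cell k-window scans by a single row-major pass keeping running consecutive-run
-- lengths in the four directions with per-player win flags (objective: alternative; not measured faster).

-- ===== PORT A =====
-- board[r][c], totalised with "" where Python would raise IndexError (excluded by Pre_); exact for in-range indices
def pyCell (board : List (List String)) (r c : Int) : String :=
  PySem.List.pyGetD (PySem.List.pyGetD board r []) c ""

-- the body of A's innermost loop: board[row][col] == player and the four guarded k-window checks (same order)
def aCellWins (board : List (List String)) (k rows cols : Int) (player : String) (row col : Int) : Bool :=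
  pyCell board row col == player &&
    ((decide (col + k ≤ cols) && (PySem.List.pyRange 0 k 1).all (fun i => pyCell board row (col + i) == player)) ||
     (decide (row + k ≤ rows) && (PySem.List.pyRange 0 k 1).all (fun i => pyCell board (row + i) col == player)) ||
     (decide (row + k ≤ rows) && decide (col + k ≤ cols) && (PySem.List.pyRange 0 k 1).all (fun i => pyCell board (row + i) (col + i) == player)) ||
     (decide (row + k ≤ rows) && decide (col - k + 1 ≥ 0) && (PySem.List.pyRange 0 k 1).all (fun i => pyCell board (row + i) (col - i) == player)))

-- the two nested loops over rows/cols with early return: any row, any col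
def aScan (board : List (List String)) (k rows cols : Int) (player : String) : Bool :=
  (PySem.List.pyRange 0 rows 1).any (fun row =>
    (PySem.List.pyRange 0 cols 1).any (fun col => aCellWins board k rows cols player row col))

def is_board_full_py (board : List (List String)) : Bool :=
  board.all (fun row => row.all (fun cell => !(cell == " " || cell == "-")))

def check_full_board_py (board : List (List String)) (k : Int) : Option String :=
  let rows : Int := board.length
  let cols : Int := if board.length > 0 then ((board.headD []).length : Int) else 0
  -- for player in ['X', 'O']: … return player  ⇒ first player whose scan succeeds
  match ["X", "O"].find? (fun p => aScan board k rows cols p) with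
  | some p => some p
  | none => if is_board_full_py board then some "draw" else none

-- ===== PORT B =====
-- state of B's inner (per-row) loop: horizontal run, the three new arrays being built, win flags
structure RSt where
  hown : String
  hlen : Nat
  nvert : List (String × Nat)
  ndiag : List (String × Nat)
  nadiag : List (String × Nat)
  xwin : Bool
  owin : Bool
  deriving Repr, DecidableEq

-- state carried from row to row: win flags, fullness flag, the three run arrays of the previous row
structure BSt where
  xwin : Bool
  owin : Bool
  full : Bool
  vert : List (String × Nat)
  diag : List (String × Nat)
  adiag : List (String × Nat)
  deriving Repr, DecidableEq

-- one step of B's `for c in range(cols)` loop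
def bCell (k : Int) (cols : Nat) (vert diag adiag : List (String × Nat)) (row : List String)
    (st : RSt) (c : Nat) : RSt :=
  let v := row.getD c ""
  if v == "X" || v == "O" then
    let hlen := if st.hown == v then st.hlen + 1 else 1
    let vl := if (vert.getD c ("", 0)).1 == v then (vert.getD c ("", 0)).2 + 1 else 1
    let dl := if decide (0 < c) && ((diag.getD (c - 1) ("", 0)).1 == v) then (diag.getD (c - 1) ("", 0)).2 + 1 else 1
    let al := if decide (c + 1 < cols) && ((adiag.getD (c + 1) ("", 0)).1 == v) then (adiag.getD (c + 1) ("", 0)).2 + 1 else 1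
    let win := decide (k ≤ ((max (max hlen vl) (max dl al) : Nat) : Int))
    { hown := v, hlen := hlen,
      nvert := st.nvert ++ [(v, vl)], ndiag := st.ndiag ++ [(v, dl)], nadiag := st.nadiag ++ [(v, al)],
      xwin := if win then (if v == "X" then true else st.xwin) else st.xwin,
      owin := if win then (if v == "X" then st.owin else true) else st.owin }
  else
    { hown := "", hlen := 0,
      nvert := st.nvert ++ [("", 0)], ndiag := st.ndiag ++ [("", 0)], nadiag := st.nadiag ++ [("", 0)],
      xwin := st.xwin, owin := st.owin }

-- one step of B's `for row in board` loop (inner loop, then the fullness scan of the whole row)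
def bRow (k : Int) (cols : Nat) (st : BSt) (row : List String) : BSt :=
  let r := (List.range cols).foldl (bCell k cols st.vert st.diag st.adiag row)
    { hown := "", hlen := 0, nvert := [], ndiag := [], nadiag := [], xwin := st.xwin, owin := st.owin }
  let full := row.foldl (fun f v => if v == " " || v == "-" then false else f) st.full
  { xwin := r.xwin, owin := r.owin, full := full, vert := r.nvert, diag := r.ndiag, adiag := r.nadiag }

def check_full_board_py_alt (board : List (List String)) (k : Int) : Option String :=
  let cols := (board.headD []).length
  let init : BSt := { xwin := false, owin := false, full := true,
                      vert := List.replicate cols ("", 0), diag := List.replicate cols ("", 0),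
                      adiag := List.replicate cols ("", 0) }
  let st := board.foldl (bRow k cols) init
  if st.xwin then some "X" else if st.owin then some "O"
  else if st.full then some "draw" else none

-- ===== PRECONDITION & SPEC =====
-- Pre_ excludes the non-rectangular boards with a row shorter than the first row: there Python A
-- raises IndexError (board[row][col] for col < len(board[0])) unless its scan finds a win before
-- reaching the short row, in which case A happens to return early while B's single pass raises.
def Pre_check_full_board_py (board : List (List String)) (k : Int) : Prop :=
  ∀ row ∈ board, (board.headD []).length ≤ row.length
instance (board : List (List String)) (k : Int) : Decidable (Pre_check_full_board_py board k) := by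
  unfold Pre_check_full_board_py; infer_instance
def pvWitness_check_full_board_py : List (List String) × Int := ([[" ", "X"], ["O", "X"]], 2)
def Spec_check_full_board_py (board : List (List String)) (k : Int) (out : Option String) : Prop := out = check_full_board_py_alt board k
instance (board : List (List String)) (k : Int) (out : Option String) : Decidable (Spec_check_full_board_py board k out) := by unfold Spec_check_full_board_py; infer_instance

-- ===== CLAIM (what is proved, stated in full; the proofs are below) =====
def Claim_equal_check_full_board_py : Prop := ∀ (board : List (List String)) (k : Int), Dom_check_full_board_py board k → Pre_check_full_board_py board k → Spec_check_full_board_py board k (check_full_board_py board k)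

-- ===== LEMMAS AND PROOFS =====


-- ---------- proof-side abstractions ----------

-- board[r][c] with Nat indices, "" out of range (both ports read cells exactly like this in range)
def cellN (board : List (List String)) (r c : Nat) : String := (board.getD r []).getD c ""

def isXO (v : String) : Bool := v == "X" || v == "O"

-- length of the run of p-cells ending at (r,c) going left / up / up-left / up-right (bounded by cols C)
def hrun (board : List (List String)) (p : String) (r : Nat) : Nat → Nat
  | 0 => if cellN board r 0 = p then 1 else 0
  | c + 1 => if cellN board r (c + 1) = p then hrun board p r c + 1 else 0

def vrun (board : List (List String)) (p : String) : Nat → Nat → Nat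
  | 0, c => if cellN board 0 c = p then 1 else 0
  | r + 1, c => if cellN board (r + 1) c = p then vrun board p r c + 1 else 0

def drun (board : List (List String)) (p : String) : Nat → Nat → Nat
  | 0, c => if cellN board 0 c = p then 1 else 0
  | r + 1, 0 => if cellN board (r + 1) 0 = p then 1 else 0
  | r + 1, c + 1 => if cellN board (r + 1) (c + 1) = p then drun board p r c + 1 else 0

def arun (board : List (List String)) (C : Nat) (p : String) : Nat → Nat → Nat
  | 0, c => if cellN board 0 c = p then 1 else 0
  | r + 1, c => if cellN board (r + 1) c = p then (if c + 1 < C then arun board C p r (c + 1) + 1 else 1) else 0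

-- "some run of length ≥ k ends at (r,c) and (r,c) is a p-cell"
def winEnd (board : List (List String)) (C : Nat) (k : Int) (p : String) (r c : Nat) : Bool :=
  decide (cellN board r c = p) &&
    (decide (k ≤ (hrun board p r c : Int)) || decide (k ≤ (vrun board p r c : Int)) ||
     decide (k ≤ (drun board p r c : Int)) || decide (k ≤ (arun board C p r c : Int)))

-- a win detected after processing rows < t completely and columns < j of row t
def winUpto (board : List (List String)) (C : Nat) (k : Int) (p : String) (t j : Nat) : Bool :=
  decide (∃ r < t, ∃ c < C, winEnd board C k p r c = true) || decide (∃ c < j, winEnd board C k p t c = true)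

-- the array entries the DP carries into row t
def entV (board : List (List String)) (t c : Nat) : String × Nat :=
  match t with
  | 0 => ("", 0)
  | t' + 1 => if isXO (cellN board t' c) then (cellN board t' c, vrun board (cellN board t' c) t' c) else ("", 0)

def entD (board : List (List String)) (t c : Nat) : String × Nat :=
  match t with
  | 0 => ("", 0)
  | t' + 1 => if isXO (cellN board t' c) then (cellN board t' c, drun board (cellN board t' c) t' c) else ("", 0)

def entA (board : List (List String)) (C : Nat) (t c : Nat) : String × Nat :=
  match t with
  | 0 => ("", 0)
  | t' + 1 => if isXO (cellN board t' c) then (cellN board t' c, arun board C (cellN board t' c) t' c) else ("", 0)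

-- the horizontal state after processing columns < j of row t
def entH (board : List (List String)) (t j : Nat) : String × Nat :=
  match j with
  | 0 => ("", 0)
  | j' + 1 => if isXO (cellN board t j') then (cellN board t j', hrun board (cellN board t j') t j') else ("", 0)

def rowInv (board : List (List String)) (C : Nat) (k : Int) (t j : Nat) : RSt :=
  { hown := (entH board t j).1, hlen := (entH board t j).2,
    nvert := (List.range j).map (fun c => entV board (t + 1) c),
    ndiag := (List.range j).map (fun c => entD board (t + 1) c),
    nadiag := (List.range j).map (fun c => entA board C (t + 1) c),
    xwin := winUpto board C k "X" t j,
    owin := winUpto board C k "O" t j }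

def fullUpto (board : List (List String)) (t : Nat) : Bool :=
  (board.take t).all (fun row => row.all (fun v => !(v == " " || v == "-")))

def stInv (board : List (List String)) (C : Nat) (k : Int) (t : Nat) : BSt :=
  { xwin := winUpto board C k "X" t 0, owin := winUpto board C k "O" t 0,
    full := fullUpto board t,
    vert := (List.range C).map (entV board t),
    diag := (List.range C).map (entD board t),
    adiag := (List.range C).map (fun c => entA board C t c) }

-- A's window condition at a start cell, in Nat form
def winStart (board : List (List String)) (R C : Nat) (k : Int) (p : String) (r c : Nat) : Bool :=
  decide (cellN board r c = p ∧
    (((c : Int) + k ≤ (C : Int) ∧ ∀ i < k.toNat, cellN board r (c + i) = p) ∨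
     ((r : Int) + k ≤ (R : Int) ∧ ∀ i < k.toNat, cellN board (r + i) c = p) ∨
     ((r : Int) + k ≤ (R : Int) ∧ (c : Int) + k ≤ (C : Int) ∧ ∀ i < k.toNat, cellN board (r + i) (c + i) = p) ∨
     ((r : Int) + k ≤ (R : Int) ∧ 0 ≤ (c : Int) - k + 1 ∧ ∀ i < k.toNat, cellN board (r + i) (c - i) = p)))

-- ---------- small facts about runs and flags ----------

theorem bool_ext {a b : Bool} (h : a = true ↔ b = true) : a = b := Bool.coe_iff_coe.mp h

theorem hrun_zero_of_ne {board : List (List String)} {p : String} {r c : Nat}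
    (h : cellN board r c ≠ p) : hrun board p r c = 0 := by cases c <;> simp [hrun, h]

theorem vrun_zero_of_ne {board : List (List String)} {p : String} {r c : Nat}
    (h : cellN board r c ≠ p) : vrun board p r c = 0 := by cases r <;> simp [vrun, h]

theorem drun_zero_of_ne {board : List (List String)} {p : String} {r c : Nat}
    (h : cellN board r c ≠ p) : drun board p r c = 0 := by
  cases r <;> cases c <;> simp [drun, h]

theorem arun_zero_of_ne {board : List (List String)} {C : Nat} {p : String} {r c : Nat}
    (h : cellN board r c ≠ p) : arun board C p r c = 0 := by cases r <;> simp [arun, h]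

theorem winUpto_succ_col (board : List (List String)) (C : Nat) (k : Int) (p : String) (t j : Nat) :
    winUpto board C k p t (j + 1) = (winUpto board C k p t j || winEnd board C k p t j) := by
  apply bool_ext
  simp only [winUpto, Bool.or_eq_true, decide_eq_true_eq]
  constructor
  · rintro (h | ⟨c, hc, hE⟩)
    · exact Or.inl (Or.inl h)
    · rcases Nat.lt_succ_iff_lt_or_eq.mp hc with h' | h'
      · exact Or.inl (Or.inr ⟨c, h', hE⟩)
      · subst h'; exact Or.inr hE
  · rintro ((h | ⟨c, hc, hE⟩) | hE)
    · exact Or.inl h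
    · exact Or.inr ⟨c, by omega, hE⟩
    · exact Or.inr ⟨j, by omega, hE⟩

theorem winUpto_succ_row (board : List (List String)) (C : Nat) (k : Int) (p : String) (t : Nat) :
    winUpto board C k p t C = winUpto board C k p (t + 1) 0 := by
  apply bool_ext
  simp only [winUpto, Bool.or_eq_true, decide_eq_true_eq]
  constructor
  · rintro (⟨r, hr, h⟩ | ⟨c, hc, hE⟩)
    · exact Or.inl ⟨r, by omega, h⟩
    · exact Or.inl ⟨t, by omega, c, hc, hE⟩
  · rintro (⟨r, hr, c, hc, hE⟩ | ⟨c, hc, _⟩)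
    · rcases Nat.lt_succ_iff_lt_or_eq.mp hr with h' | h'
      · exact Or.inl ⟨r, h', c, hc, hE⟩
      · subst h'; exact Or.inr ⟨c, hc, hE⟩
    · omega

-- ---------- bridges for port A ----------

theorem pyCell_natCast (board : List (List String)) (r c : Nat) :
    pyCell board (r : Int) (c : Int) = cellN board r c := by
  simp [pyCell, PySem.List.pyGetD_natCast, cellN]

theorem forall_range_int_iff (k : Int) (P : Int → Prop) :
    (∀ i : Int, 0 ≤ i ∧ i < k → P i) ↔ (∀ i : Nat, i < k.toNat → P (i : Int)) := by
  constructor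
  · intro h i hi; exact h (i : Int) (by omega)
  · intro h i hi
    have := h i.toNat (by omega)
    rwa [Int.toNat_of_nonneg hi.1] at this

theorem aCellWins_iff (board : List (List String)) (k : Int) (R C : Nat) (p : String) (r c : Nat) :
    aCellWins board k (R : Int) (C : Int) p (r : Int) (c : Int) = true ↔
      winStart board R C k p r c := by
  simp only [aCellWins, winStart, Bool.and_eq_true, Bool.or_eq_true, decide_eq_true_eq,
    List.all_eq_true, PySem.List.mem_pyRange_one, beq_iff_eq, pyCell_natCast, ge_iff_le, and_assoc]

  rw [or_assoc, or_assoc]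
  refine and_congr Iff.rfl (or_congr ?_ (or_congr ?_ (or_congr ?_ ?_)))
  · refine and_congr Iff.rfl ?_
    rw [forall_range_int_iff]
    refine forall_congr' fun i => imp_congr Iff.rfl ?_
    rw [show (c : Int) + (i : Int) = ((c + i : Nat) : Int) by push_cast; ring, pyCell_natCast]
  · refine and_congr Iff.rfl ?_
    rw [forall_range_int_iff]
    refine forall_congr' fun i => imp_congr Iff.rfl ?_
    rw [show (r : Int) + (i : Int) = ((r + i : Nat) : Int) by push_cast; ring, pyCell_natCast]
  · refine and_congr Iff.rfl (and_congr Iff.rfl ?_)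
    rw [forall_range_int_iff]
    refine forall_congr' fun i => imp_congr Iff.rfl ?_
    rw [show (r : Int) + (i : Int) = ((r + i : Nat) : Int) by push_cast; ring,
        show (c : Int) + (i : Int) = ((c + i : Nat) : Int) by push_cast; ring, pyCell_natCast]
  · constructor
    · rintro ⟨hg1, hg2, hall⟩
      refine ⟨hg1, hg2, ?_⟩
      rw [forall_range_int_iff] at hall
      intro i hi
      have := hall i hi
      rwa [show (r : Int) + (i : Int) = ((r + i : Nat) : Int) by push_cast; ring,
           show (c : Int) - (i : Int) = ((c - i : Nat) : Int) by omega, pyCell_natCast] at this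
    · rintro ⟨hg1, hg2, hall⟩
      refine ⟨hg1, hg2, ?_⟩
      rw [forall_range_int_iff]
      intro i hi
      have := hall i hi
      rwa [show (r : Int) + (i : Int) = ((r + i : Nat) : Int) by push_cast; ring,
           show (c : Int) - (i : Int) = ((c - i : Nat) : Int) by omega, pyCell_natCast]

theorem aScan_iff (board : List (List String)) (k : Int) (p : String) :
    aScan board k (board.length : Int) (((board.headD []).length : Nat) : Int) p = true ↔
      ∃ r < board.length, ∃ c < (board.headD []).length,
        winStart board board.length (board.headD []).length k p r c := by
  simp only [aScan, List.any_eq_true, PySem.List.mem_pyRange_one]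
  constructor
  · rintro ⟨ρ, ⟨h0, hR⟩, γ, ⟨g0, gC⟩, hw⟩
    refine ⟨ρ.toNat, by omega, γ.toNat, by omega, ?_⟩
    rw [← aCellWins_iff]
    rwa [Int.toNat_of_nonneg h0, Int.toNat_of_nonneg g0]
  · rintro ⟨r, hr, c, hc, hw⟩
    exact ⟨(r : Int), ⟨by omega, by omega⟩, (c : Int), ⟨by omega, by omega⟩,
      (aCellWins_iff board k _ _ p r c).mpr hw⟩

-- ---------- runs ↔ windows ----------

-- unfolding equations for the runs at a p-cell
theorem hrun_succ_eq {board : List (List String)} {p : String} {r c : Nat}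
    (h : cellN board r (c + 1) = p) : hrun board p r (c + 1) = hrun board p r c + 1 := by
  simp [hrun, h]

theorem vrun_succ_eq {board : List (List String)} {p : String} {r c : Nat}
    (h : cellN board (r + 1) c = p) : vrun board p (r + 1) c = vrun board p r c + 1 := by
  simp [vrun, h]

theorem drun_succ_eq {board : List (List String)} {p : String} {r c : Nat}
    (h : cellN board (r + 1) (c + 1) = p) : drun board p (r + 1) (c + 1) = drun board p r c + 1 := by
  simp [drun, h]

theorem arun_succ_eq {board : List (List String)} {C : Nat} {p : String} {r c : Nat}
    (h : cellN board (r + 1) c = p) :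
    arun board C p (r + 1) c = (if c + 1 < C then arun board C p r (c + 1) + 1 else 1) := by
  simp [arun, h]

theorem hrun_pos {board : List (List String)} {p : String} {r c : Nat}
    (h : cellN board r c = p) : 1 ≤ hrun board p r c := by cases c <;> simp [hrun, h]

theorem vrun_pos {board : List (List String)} {p : String} {r c : Nat}
    (h : cellN board r c = p) : 1 ≤ vrun board p r c := by cases r <;> simp [vrun, h]

theorem drun_pos {board : List (List String)} {p : String} {r c : Nat}
    (h : cellN board r c = p) : 1 ≤ drun board p r c := by
  cases r <;> cases c <;> simp [drun, h]

theorem arun_pos {board : List (List String)} {C : Nat} {p : String} {r c : Nat}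
    (h : cellN board r c = p) : 1 ≤ arun board C p r c := by
  cases r <;> simp [arun, h] <;> split <;> omega

-- runs are bounded by how far the board edge is
theorem hrun_le (board : List (List String)) (p : String) (r c : Nat) :
    hrun board p r c ≤ c + 1 := by
  induction c with
  | zero => simp only [hrun]; split <;> omega
  | succ c ih => simp only [hrun]; split <;> omega

theorem vrun_le (board : List (List String)) (p : String) (r c : Nat) :
    vrun board p r c ≤ r + 1 := by
  induction r with
  | zero => simp only [vrun]; split <;> omega
  | succ r ih => simp only [vrun]; split <;> omega

theorem drun_le (board : List (List String)) (p : String) (r c : Nat) :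
    drun board p r c ≤ r + 1 ∧ drun board p r c ≤ c + 1 := by
  induction r generalizing c with
  | zero => simp only [drun]; split <;> omega
  | succ r ih =>
      cases c with
      | zero => simp only [drun]; split <;> omega
      | succ c => have := ih c; simp only [drun]; split <;> omega

theorem arun_le (board : List (List String)) (C : Nat) (p : String) (r c : Nat) :
    arun board C p r c ≤ r + 1 := by
  induction r generalizing c with
  | zero => simp only [arun]; split <;> omega
  | succ r ih => have := ih (c + 1); simp only [arun]; split <;> [skip; omega]; split <;> omega

-- every cell inside a run is a p-cell
theorem hrun_cells (board : List (List String)) (p : String) (r c : Nat) :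
    ∀ j < hrun board p r c, cellN board r (c - j) = p := by
  induction c with
  | zero =>
      intro j hj
      simp only [hrun] at hj; split at hj
      · interval_cases j; · simpa using ‹cellN board r 0 = p›
      · omega
  | succ c ih =>
      intro j hj
      simp only [hrun] at hj; split at hj
      · cases j with
        | zero => simpa using ‹cellN board r (c + 1) = p›
        | succ j => have := ih j (by omega); rwa [show c + 1 - (j + 1) = c - j by omega]
      · omega

theorem vrun_cells (board : List (List String)) (p : String) (r c : Nat) :
    ∀ j < vrun board p r c, cellN board (r - j) c = p := by
  induction r with
  | zero =>
      intro j hj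
      simp only [vrun] at hj; split at hj
      · interval_cases j; · simpa using ‹cellN board 0 c = p›
      · omega
  | succ r ih =>
      intro j hj
      simp only [vrun] at hj; split at hj
      · cases j with
        | zero => simpa using ‹cellN board (r + 1) c = p›
        | succ j => have := ih j (by omega); rwa [show r + 1 - (j + 1) = r - j by omega]
      · omega

theorem drun_cells (board : List (List String)) (p : String) (r c : Nat) :
    ∀ j < drun board p r c, cellN board (r - j) (c - j) = p := by
  induction r generalizing c with
  | zero =>
      intro j hj
      simp only [drun] at hj; split at hj
      · interval_cases j; · simpa using ‹cellN board 0 c = p›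
      · omega
  | succ r ih =>
      cases c with
      | zero =>
          intro j hj
          simp only [drun] at hj; split at hj
          · interval_cases j; · simpa using ‹cellN board (r + 1) 0 = p›
          · omega
      | succ c =>
          intro j hj
          simp only [drun] at hj; split at hj
          · cases j with
            | zero => simpa using ‹cellN board (r + 1) (c + 1) = p›
            | succ j =>
                have := ih c j (by omega)
                rwa [show r + 1 - (j + 1) = r - j by omega, show c + 1 - (j + 1) = c - j by omega]
          · omega

theorem arun_cells (board : List (List String)) (C : Nat) (p : String) (r c : Nat) :
    ∀ j < arun board C p r c, cellN board (r - j) (c + j) = p := by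
  induction r generalizing c with
  | zero =>
      intro j hj
      simp only [arun] at hj; split at hj
      · interval_cases j; · simpa using ‹cellN board 0 c = p›
      · omega
  | succ r ih =>
      intro j hj
      simp only [arun] at hj; split at hj
      · split at hj
        · cases j with
          | zero => simpa using ‹cellN board (r + 1) c = p›
          | succ j =>
              have := ih (c + 1) j (by omega)
              rwa [show r + 1 - (j + 1) = r - j by omega, show c + (j + 1) = c + 1 + j by omega]
        · interval_cases j; · simpa using ‹cellN board (r + 1) c = p›
      · omega

-- the anti-diagonal run never leaves the first C columns
theorem arun_colbound (board : List (List String)) (C : Nat) (p : String) (r c : Nat) :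
    ∀ j < arun board C p r c, j = 0 ∨ c + j < C := by
  induction r generalizing c with
  | zero =>
      intro j hj
      simp only [arun] at hj; split at hj
      · omega
      · omega
  | succ r ih =>
      intro j hj
      simp only [arun] at hj; split at hj
      · split at hj
        · cases j with
          | zero => exact Or.inl rfl
          | succ j =>
              rcases ih (c + 1) j (by omega) with h | h
              · right; omega
              · right; omega
        · omega
      · omega

-- a full k-window yields a run of length ≥ k at its last cell
theorem hrun_ge (board : List (List String)) (p : String) (r b K : Nat) (hK : 0 < K)
    (hall : ∀ i < K, cellN board r (b + i) = p) : K ≤ hrun board p r (b + K - 1) := by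
  induction K with
  | zero => omega
  | succ K ih =>
      cases Nat.eq_zero_or_pos K with
      | inl h0 =>
          subst h0
          simpa using hrun_pos (by simpa using hall 0 (by omega))
      | inr hKp =>
          have hcell : cellN board r (b + K - 1 + 1) = p := by
            have := hall K (by omega); rwa [show b + K - 1 + 1 = b + K by omega]
          have := ih hKp (fun i hi => hall i (by omega))
          rw [show b + (K + 1) - 1 = b + K - 1 + 1 by omega, hrun_succ_eq hcell]
          omega

theorem vrun_ge (board : List (List String)) (p : String) (b c K : Nat) (hK : 0 < K)
    (hall : ∀ i < K, cellN board (b + i) c = p) : K ≤ vrun board p (b + K - 1) c := by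
  induction K with
  | zero => omega
  | succ K ih =>
      cases Nat.eq_zero_or_pos K with
      | inl h0 =>
          subst h0
          simpa using vrun_pos (by simpa using hall 0 (by omega))
      | inr hKp =>
          have hcell : cellN board (b + K - 1 + 1) c = p := by
            have := hall K (by omega); rwa [show b + K - 1 + 1 = b + K by omega]
          have := ih hKp (fun i hi => hall i (by omega))
          rw [show b + (K + 1) - 1 = b + K - 1 + 1 by omega, vrun_succ_eq hcell]
          omega

theorem drun_ge (board : List (List String)) (p : String) (rb cb K : Nat) (hK : 0 < K)
    (hall : ∀ i < K, cellN board (rb + i) (cb + i) = p) :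
    K ≤ drun board p (rb + K - 1) (cb + K - 1) := by
  induction K with
  | zero => omega
  | succ K ih =>
      cases Nat.eq_zero_or_pos K with
      | inl h0 =>
          subst h0
          simpa using drun_pos (by simpa using hall 0 (by omega))
      | inr hKp =>
          have hcell : cellN board (rb + K - 1 + 1) (cb + K - 1 + 1) = p := by
            have := hall K (by omega)
            rwa [show rb + K - 1 + 1 = rb + K by omega, show cb + K - 1 + 1 = cb + K by omega]
          have := ih hKp (fun i hi => hall i (by omega))
          rw [show rb + (K + 1) - 1 = rb + K - 1 + 1 by omega,
              show cb + (K + 1) - 1 = cb + K - 1 + 1 by omega, drun_succ_eq hcell]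
          omega

theorem arun_ge (board : List (List String)) (C : Nat) (p : String) (rb cb K : Nat) (hK : 0 < K)
    (hcb : K - 1 ≤ cb) (hC : cb < C)
    (hall : ∀ i < K, cellN board (rb + i) (cb - i) = p) :
    K ≤ arun board C p (rb + K - 1) (cb + 1 - K) := by
  induction K with
  | zero => omega
  | succ K ih =>
      cases Nat.eq_zero_or_pos K with
      | inl h0 =>
          subst h0
          have hc : cellN board rb cb = p := by simpa using hall 0 (by omega)
          have := arun_pos (C := C) hc
          rw [show rb + 1 - 1 = rb by omega, show cb + 1 - 1 = cb by omega]
          omega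
      | inr hKp =>
          have hcell : cellN board (rb + K - 1 + 1) (cb - K) = p := by
            have := hall K (by omega)
            rwa [show rb + K = rb + K - 1 + 1 by omega] at this
          have hih := ih hKp (by omega) (fun i hi => hall i (by omega))
          rw [show rb + (K + 1) - 1 = rb + K - 1 + 1 by omega,
              show cb + 1 - (K + 1) = cb - K by omega, arun_succ_eq hcell,
              if_pos (by omega : cb - K + 1 < C), show cb - K + 1 = cb + 1 - K by omega]
          omega

theorem winStart_exists_iff_winEnd_exists (board : List (List String)) (k : Int) :
    ∀ p, (∃ r < board.length, ∃ c < (board.headD []).length,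
            winStart board board.length (board.headD []).length k p r c) ↔
         (∃ r < board.length, ∃ c < (board.headD []).length,
            winEnd board (board.headD []).length k p r c = true) := by
  intro p
  simp only [winStart, decide_eq_true_eq]
  by_cases hk : k ≤ 0
  · constructor
    · rintro ⟨r, hr, c, hc, hcell, _⟩
      refine ⟨r, hr, c, hc, ?_⟩
      simp only [winEnd, Bool.and_eq_true, Bool.or_eq_true, decide_eq_true_eq]
      exact ⟨hcell, Or.inl (Or.inl (Or.inl (by omega)))⟩
    · rintro ⟨r, hr, c, hc, hE⟩
      simp only [winEnd, Bool.and_eq_true, Bool.or_eq_true, decide_eq_true_eq] at hE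
      refine ⟨r, hr, c, hc, hE.1, Or.inl ⟨by omega, fun i hi => by omega⟩⟩
  · push_neg at hk
    obtain ⟨K, hkK⟩ : ∃ K : Nat, k = (K : Int) := ⟨k.toNat, by omega⟩
    have hKt : k.toNat = K := by omega
    have hKpos : 0 < K := by omega
    constructor
    · rintro ⟨r, hr, c, hc, hcell, hdir⟩
      rcases hdir with ⟨hg, hall⟩ | ⟨hg, hall⟩ | ⟨hg1, hg2, hall⟩ | ⟨hg1, hg2, hall⟩ <;>
        rw [hKt] at hall
      · refine ⟨r, hr, c + K - 1, by omega, ?_⟩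
        simp only [winEnd, Bool.and_eq_true, Bool.or_eq_true, decide_eq_true_eq]
        have hrge := hrun_ge board p r c K hKpos hall
        have hc1 : cellN board r (c + K - 1) = p := by
          have := hall (K - 1) (by omega); rwa [show c + (K - 1) = c + K - 1 by omega] at this
        exact ⟨hc1, Or.inl (Or.inl (Or.inl (by omega)))⟩
      · refine ⟨r + K - 1, by omega, c, hc, ?_⟩
        simp only [winEnd, Bool.and_eq_true, Bool.or_eq_true, decide_eq_true_eq]
        have hrge := vrun_ge board p r c K hKpos hall
        have hc1 : cellN board (r + K - 1) c = p := by
          have := hall (K - 1) (by omega); rwa [show r + (K - 1) = r + K - 1 by omega] at this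
        exact ⟨hc1, Or.inl (Or.inl (Or.inr (by omega)))⟩
      · refine ⟨r + K - 1, by omega, c + K - 1, by omega, ?_⟩
        simp only [winEnd, Bool.and_eq_true, Bool.or_eq_true, decide_eq_true_eq]
        have hrge := drun_ge board p r c K hKpos hall
        have hc1 : cellN board (r + K - 1) (c + K - 1) = p := by
          have := hall (K - 1) (by omega)
          rwa [show r + (K - 1) = r + K - 1 by omega, show c + (K - 1) = c + K - 1 by omega] at this
        exact ⟨hc1, Or.inl (Or.inr (by omega))⟩
      · refine ⟨r + K - 1, by omega, c + 1 - K, by omega, ?_⟩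
        simp only [winEnd, Bool.and_eq_true, Bool.or_eq_true, decide_eq_true_eq]
        have hrge := arun_ge board (board.headD []).length p r c K hKpos (by omega) hc hall
        have hc1 : cellN board (r + K - 1) (c + 1 - K) = p := by
          have := hall (K - 1) (by omega)
          rwa [show r + (K - 1) = r + K - 1 by omega, show c - (K - 1) = c + 1 - K by omega] at this
        exact ⟨hc1, Or.inr (by omega)⟩
    · rintro ⟨r, hr, c, hc, hE⟩
      simp only [winEnd, Bool.and_eq_true, Bool.or_eq_true, decide_eq_true_eq] at hE
      obtain ⟨hcell, hdir⟩ := hE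
      rcases hdir with ((h | h) | h) | h
      · have hKle : K ≤ hrun board p r c := by omega
        have hle := hrun_le board p r c
        refine ⟨r, hr, c + 1 - K, by omega, ?_, Or.inl ⟨by omega, ?_⟩⟩
        · have := hrun_cells board p r c (K - 1) (by omega)
          rwa [show c - (K - 1) = c + 1 - K by omega] at this
        · rw [hKt]
          intro i hi
          have := hrun_cells board p r c (K - 1 - i) (by omega)
          rwa [show c - (K - 1 - i) = c + 1 - K + i by omega] at this
      · have hKle : K ≤ vrun board p r c := by omega
        have hle := vrun_le board p r c
        refine ⟨r + 1 - K, by omega, c, hc, ?_, Or.inr (Or.inl ⟨by omega, ?_⟩)⟩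
        · have := vrun_cells board p r c (K - 1) (by omega)
          rwa [show r - (K - 1) = r + 1 - K by omega] at this
        · rw [hKt]
          intro i hi
          have := vrun_cells board p r c (K - 1 - i) (by omega)
          rwa [show r - (K - 1 - i) = r + 1 - K + i by omega] at this
      · have hKle : K ≤ drun board p r c := by omega
        have hle := drun_le board p r c
        refine ⟨r + 1 - K, by omega, c + 1 - K, by omega, ?_,
          Or.inr (Or.inr (Or.inl ⟨by omega, by omega, ?_⟩))⟩
        · have := drun_cells board p r c (K - 1) (by omega)
          rwa [show r - (K - 1) = r + 1 - K by omega, show c - (K - 1) = c + 1 - K by omega] at this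
        · rw [hKt]
          intro i hi
          have := drun_cells board p r c (K - 1 - i) (by omega)
          rwa [show r - (K - 1 - i) = r + 1 - K + i by omega,
               show c - (K - 1 - i) = c + 1 - K + i by omega] at this
      · have hKle : K ≤ arun board (board.headD []).length p r c := by omega
        have hle := arun_le board (board.headD []).length p r c
        have hcK : c + K - 1 < (board.headD []).length := by
          cases Nat.eq_zero_or_pos (K - 1) with
          | inl h0 => omega
          | inr hp =>
              rcases arun_colbound board (board.headD []).length p r c (K - 1) (by omega) with h' | h'
              · omega
              · omega
        refine ⟨r + 1 - K, by omega, c + K - 1, hcK, ?_,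
          Or.inr (Or.inr (Or.inr ⟨by omega, by omega, ?_⟩))⟩
        · have := arun_cells board (board.headD []).length p r c (K - 1) (by omega)
          rwa [show r - (K - 1) = r + 1 - K by omega, show c + (K - 1) = c + K - 1 by omega] at this
        · rw [hKt]
          intro i hi
          have := arun_cells board (board.headD []).length p r c (K - 1 - i) (by omega)
          rwa [show r - (K - 1 - i) = r + 1 - K + i by omega,
               show c + (K - 1 - i) = c + K - 1 - i by omega] at this

-- ---------- the DP invariant ----------

-- one DP cell-update computes the run value, per direction
theorem beq_empty_false {p : String} (hp : isXO p = true) : ("" == p) = false := by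
  rcases (by simpa [isXO] using hp : p = "X" ∨ p = "O") with h | h <;> simp [h]

theorem entH_step (board : List (List String)) (t j : Nat) (p : String)
    (hp : isXO p = true) (hcell : cellN board t j = p) :
    (if (entH board t j).1 == p then (entH board t j).2 + 1 else 1) = hrun board p t j := by
  have hpne := beq_empty_false hp
  cases j with
  | zero => simp [entH, hpne, hrun, hcell]
  | succ j' =>
      simp only [entH]
      by_cases hx : isXO (cellN board t j') = true
      · rw [if_pos hx]
        by_cases he : cellN board t j' = p
        · simp [he, hrun, hcell]
        · have hb : (cellN board t j' == p) = false := by simp [he]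
          simp [hb, hrun, hcell, hrun_zero_of_ne he]
      · have he : cellN board t j' ≠ p := fun h => hx (h ▸ hp)
        simp [if_neg hx, hpne, hrun, hcell, hrun_zero_of_ne he]

theorem entV_step (board : List (List String)) (t j : Nat) (p : String)
    (hp : isXO p = true) (hcell : cellN board t j = p) :
    (if (entV board t j).1 == p then (entV board t j).2 + 1 else 1) = vrun board p t j := by
  have hpne := beq_empty_false hp
  cases t with
  | zero => simp [entV, hpne, vrun, hcell]
  | succ t' =>
      simp only [entV]
      by_cases hx : isXO (cellN board t' j) = true
      · rw [if_pos hx]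
        by_cases he : cellN board t' j = p
        · simp [he, vrun, hcell]
        · have hb : (cellN board t' j == p) = false := by simp [he]
          simp [hb, vrun, hcell, vrun_zero_of_ne he]
      · have he : cellN board t' j ≠ p := fun h => hx (h ▸ hp)
        simp [if_neg hx, hpne, vrun, hcell, vrun_zero_of_ne he]

theorem entD_step (board : List (List String)) (t j : Nat) (p : String)
    (hp : isXO p = true) (hcell : cellN board t j = p) :
    (if decide (0 < j) && ((entD board t (j - 1)).1 == p) then (entD board t (j - 1)).2 + 1 else 1) =
      drun board p t j := by
  have hpne := beq_empty_false hp
  cases j with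
  | zero => cases t <;> simp [drun, hcell]
  | succ j' =>
      simp only [show (0:Nat) < j' + 1 by omega, decide_true, Bool.true_and,
        show j' + 1 - 1 = j' by omega]
      cases t with
      | zero => simp [entD, hpne, drun, hcell]
      | succ t' =>
          simp only [entD]
          by_cases hx : isXO (cellN board t' j') = true
          · rw [if_pos hx]
            by_cases he : cellN board t' j' = p
            · simp [he, drun, hcell]
            · have hb : (cellN board t' j' == p) = false := by simp [he]
              simp [hb, drun, hcell, drun_zero_of_ne he]
          · have he : cellN board t' j' ≠ p := fun h => hx (h ▸ hp)
            simp [if_neg hx, hpne, drun, hcell, drun_zero_of_ne he]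

theorem entA_step (board : List (List String)) (C : Nat) (t j : Nat) (p : String)
    (hp : isXO p = true) (hcell : cellN board t j = p) :
    (if decide (j + 1 < C) && ((entA board C t (j + 1)).1 == p) then (entA board C t (j + 1)).2 + 1 else 1) =
      arun board C p t j := by
  have hpne := beq_empty_false hp
  by_cases hjC : j + 1 < C
  · simp only [hjC, decide_true, Bool.true_and]
    cases t with
    | zero => simp [entA, hpne, arun, hcell, hjC]
    | succ t' =>
        simp only [entA]
        by_cases hx : isXO (cellN board t' (j + 1)) = true
        · rw [if_pos hx]
          by_cases he : cellN board t' (j + 1) = p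
          · simp [he, arun, hcell, hjC]
          · have hb : (cellN board t' (j + 1) == p) = false := by simp [he]
            simp [hb, arun, hcell, hjC, arun_zero_of_ne he]
        · have he : cellN board t' (j + 1) ≠ p := fun h => hx (h ▸ hp)
          simp [if_neg hx, hpne, arun, hcell, hjC, arun_zero_of_ne he]
  · simp only [hjC, decide_false, Bool.false_and, if_neg Bool.false_ne_true]
    cases t <;> simp [arun, hcell, hjC]

theorem winEnd_eq_max (board : List (List String)) (C : Nat) (k : Int) (t j : Nat) (p : String)
    (hcell : cellN board t j = p) :
    winEnd board C k p t j =
      decide (k ≤ ((max (max (hrun board p t j) (vrun board p t j))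
        (max (drun board p t j) (arun board C p t j)) : Nat) : Int)) := by
  apply bool_ext
  simp [winEnd, hcell, Nat.cast_max, le_max_iff, or_assoc]

theorem winEnd_false (board : List (List String)) (C : Nat) (k : Int) (t j : Nat) (p : String)
    (hcell : cellN board t j ≠ p) : winEnd board C k p t j = false := by
  simp [winEnd, hcell]


theorem inner_step (board : List (List String)) (C : Nat) (k : Int) (t j : Nat) (hj : j < C) :
    bCell k C ((List.range C).map (entV board t)) ((List.range C).map (entD board t))
      ((List.range C).map (fun c => entA board C t c)) (board.getD t [])
      (rowInv board C k t j) j = rowInv board C k t (j + 1) := by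
  have hgetV : ((List.range C).map (entV board t)).getD j ("", 0) = entV board t j :=
    PySem.List.getD_map_range (entV board t) C j _ hj
  have hgetD : ∀ i, i < C → ((List.range C).map (entD board t)).getD i ("", 0) = entD board t i :=
    fun i hi => PySem.List.getD_map_range (entD board t) C i _ hi
  have hgetA : ∀ i, i < C → ((List.range C).map (fun c => entA board C t c)).getD i ("", 0) =
      entA board C t i :=
    fun i hi => PySem.List.getD_map_range (fun c => entA board C t c) C i _ hi
  have hcl : (board.getD t []).getD j "" = cellN board t j := rfl
  by_cases hv : isXO (cellN board t j) = true
  · have hv' : cellN board t j = "X" ∨ cellN board t j = "O" := by simpa [isXO] using hv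
    simp only [bCell, rowInv, hcl]
    rw [if_pos (by simpa [isXO] using hv)]
    rw [hgetV, hgetD (j - 1) (by omega)]
    rw [entH_step board t j (cellN board t j) hv rfl,
        entV_step board t j (cellN board t j) hv rfl,
        entD_step board t j (cellN board t j) hv rfl]
    have hA' : (if decide (j + 1 < C) &&
          ((((List.range C).map (fun c => entA board C t c)).getD (j + 1) ("", 0)).1 ==
            cellN board t j) then
          (((List.range C).map (fun c => entA board C t c)).getD (j + 1) ("", 0)).2 + 1 else 1) =
        arun board C (cellN board t j) t j := by
      by_cases hjC : j + 1 < C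
      · rw [hgetA (j + 1) hjC]
        exact entA_step board C t j (cellN board t j) hv rfl
      · simp only [hjC, decide_false, Bool.false_and, if_neg Bool.false_ne_true]
        cases t <;> simp [arun, hjC]
    rw [hA', ← winEnd_eq_max board C k t j (cellN board t j) rfl]
    rw [RSt.mk.injEq]
    refine ⟨by simp [entH, hv], by simp [entH, hv], ?_, ?_, ?_, ?_, ?_⟩
    · rw [List.range_succ, List.map_append]; simp [entV, hv]
    · rw [List.range_succ, List.map_append]; simp [entD, hv]
    · rw [List.range_succ, List.map_append]; simp [entA, hv]
    · rw [winUpto_succ_col]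
      rcases hv' with hX | hO
      · rw [hX]
        cases hw : winEnd board C k "X" t j <;> simp [hw]
      · rw [hO, winEnd_false board C k t j "X" (by simp [hO])]
        simp
    · rw [winUpto_succ_col]
      rcases hv' with hX | hO
      · rw [hX, winEnd_false board C k t j "O" (by simp [hX])]
        simp
      · rw [hO]
        cases hw : winEnd board C k "O" t j <;> simp [hw]
  · have hne : ∀ p, isXO p = true → cellN board t j ≠ p := fun p hp h => hv (h ▸ hp)
    simp only [bCell, hcl]
    rw [if_neg (by simpa [isXO] using hv)]
    unfold rowInv
    rw [RSt.mk.injEq]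
    refine ⟨?_, ?_, ?_, ?_, ?_, ?_, ?_⟩
    · simp [entH, hv]
    · simp [entH, hv]
    · rw [List.range_succ, List.map_append]
      simp [entV, hv]
    · rw [List.range_succ, List.map_append]
      simp [entD, hv]
    · rw [List.range_succ, List.map_append]
      simp [entA, hv]
    · rw [winUpto_succ_col,
          winEnd_false board C k t j "X" (hne "X" (by simp [isXO])), Bool.or_false]
    · rw [winUpto_succ_col,
          winEnd_false board C k t j "O" (hne "O" (by simp [isXO])), Bool.or_false]

theorem inner_fold (board : List (List String)) (C : Nat) (k : Int) (t : Nat) :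
    ∀ j ≤ C, (List.range j).foldl
      (bCell k C ((List.range C).map (entV board t)) ((List.range C).map (entD board t))
        ((List.range C).map (fun c => entA board C t c)) (board.getD t []))
      (rowInv board C k t 0) = rowInv board C k t j := by
  intro j hj
  induction j with
  | zero => simp
  | succ j ih =>
      rw [List.range_succ, List.foldl_append, ih (by omega)]
      simpa using inner_step board C k t j (by omega)

theorem full_foldl (row : List String) (b : Bool) :
    row.foldl (fun f v => if v == " " || v == "-" then false else f) b =
      (b && row.all (fun v => !(v == " " || v == "-"))) := by
  induction row generalizing b with
  | nil => simp
  | cons v row ih =>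
      rw [List.foldl_cons, List.all_cons, ih]
      by_cases h : (v == " " || v == "-") = true
      · simp [h]
      · simp only [if_neg h]
        simp only [Bool.or_eq_true, not_or, Bool.not_eq_true] at h
        simp [h.1, h.2]

theorem fullUpto_succ (board : List (List String)) (t : Nat) (ht : t < board.length) :
    fullUpto board (t + 1) =
      (fullUpto board t && (board.getD t []).all (fun v => !(v == " " || v == "-"))) := by
  unfold fullUpto
  rw [List.take_add_one, List.all_append, List.getElem?_eq_getElem ht]
  simp [List.getD, List.getElem?_eq_getElem ht]

theorem row_step (board : List (List String)) (C : Nat) (k : Int) (t : Nat)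
    (ht : t < board.length) :
    bRow k C (stInv board C k t) (board.getD t []) = stInv board C k (t + 1) := by
  have hun : bRow k C (stInv board C k t) (board.getD t []) =
      BSt.mk
        (((List.range C).foldl (bCell k C ((List.range C).map (entV board t))
          ((List.range C).map (entD board t)) ((List.range C).map (fun c => entA board C t c))
          (board.getD t [])) (rowInv board C k t 0)).xwin)
        (((List.range C).foldl (bCell k C ((List.range C).map (entV board t))
          ((List.range C).map (entD board t)) ((List.range C).map (fun c => entA board C t c))
          (board.getD t [])) (rowInv board C k t 0)).owin)
        ((board.getD t []).foldl (fun f v => if v == " " || v == "-" then false else f)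
          (fullUpto board t))
        (((List.range C).foldl (bCell k C ((List.range C).map (entV board t))
          ((List.range C).map (entD board t)) ((List.range C).map (fun c => entA board C t c))
          (board.getD t [])) (rowInv board C k t 0)).nvert)
        (((List.range C).foldl (bCell k C ((List.range C).map (entV board t))
          ((List.range C).map (entD board t)) ((List.range C).map (fun c => entA board C t c))
          (board.getD t [])) (rowInv board C k t 0)).ndiag)
        (((List.range C).foldl (bCell k C ((List.range C).map (entV board t))
          ((List.range C).map (entD board t)) ((List.range C).map (fun c => entA board C t c))
          (board.getD t [])) (rowInv board C k t 0)).nadiag) := rfl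
  rw [hun, inner_fold board C k t C le_rfl, full_foldl, ← fullUpto_succ board t ht]
  show BSt.mk (winUpto board C k "X" t C) (winUpto board C k "O" t C) _ _ _ _ = _
  rw [winUpto_succ_row board C k "X" t, winUpto_succ_row board C k "O" t]
  rfl

theorem outer_fold (board : List (List String)) (C : Nat) (k : Int) :
    ∀ (l : List (List String)) (t : Nat), board.drop t = l →
      l.foldl (bRow k C) (stInv board C k t) = stInv board C k (t + l.length) := by
  intro l
  induction l with
  | nil => intro t _; simp
  | cons row l ih =>
      intro t h
      have ht : t < board.length := by
        by_contra hle
        rw [List.drop_eq_nil_of_le (by omega)] at h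
        exact (List.cons_ne_nil _ _) h.symm
      have hcons : board[t] :: board.drop (t + 1) = row :: l := by
        rw [← List.drop_eq_getElem_cons ht, h]
      have hrow : board.getD t [] = row := by
        rw [List.getD_eq_getElem _ _ ht]
        exact (List.cons_eq_cons.mp hcons).1
      have hdrop : board.drop (t + 1) = l := (List.cons_eq_cons.mp hcons).2
      rw [List.foldl_cons, ← hrow, row_step board C k t ht, ih (t + 1) hdrop]
      simp only [List.length_cons]
      rw [show t + (l.length + 1) = t + 1 + l.length by omega]

-- ---------- assembling both sides ----------

theorem alt_eq (board : List (List String)) (k : Int) :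
    check_full_board_py_alt board k =
      (if decide (∃ r < board.length, ∃ c < (board.headD []).length,
            winEnd board (board.headD []).length k "X" r c = true) then some "X"
       else if decide (∃ r < board.length, ∃ c < (board.headD []).length,
            winEnd board (board.headD []).length k "O" r c = true) then some "O"
       else if fullUpto board board.length then some "draw" else none) := by
  have hinit : BSt.mk false false true (List.replicate (board.headD []).length ("", 0))
      (List.replicate (board.headD []).length ("", 0))
      (List.replicate (board.headD []).length ("", 0)) =
      stInv board (board.headD []).length k 0 := by
    simp only [stInv]
    rw [show entV board 0 = fun _ => (("" : String), (0 : Nat)) from funext fun c => rfl,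
        show entD board 0 = fun _ => (("" : String), (0 : Nat)) from funext fun c => rfl]
    simp [stInv, winUpto, fullUpto, entA, List.map_const', List.length_range]
  have hun : check_full_board_py_alt board k =
      (if (board.foldl (bRow k (board.headD []).length)
            (BSt.mk false false true (List.replicate (board.headD []).length ("", 0))
              (List.replicate (board.headD []).length ("", 0))
              (List.replicate (board.headD []).length ("", 0)))).xwin then some "X"
       else if (board.foldl (bRow k (board.headD []).length)
            (BSt.mk false false true (List.replicate (board.headD []).length ("", 0))
              (List.replicate (board.headD []).length ("", 0))
              (List.replicate (board.headD []).length ("", 0)))).owin then some "O"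
       else if (board.foldl (bRow k (board.headD []).length)
            (BSt.mk false false true (List.replicate (board.headD []).length ("", 0))
              (List.replicate (board.headD []).length ("", 0))
              (List.replicate (board.headD []).length ("", 0)))).full then some "draw"
       else none) := rfl
  rw [hun, hinit, outer_fold board (board.headD []).length k board 0 (by simp)]
  simp only [stInv, Nat.zero_add]
  rw [show winUpto board (board.headD []).length k "X" board.length 0 =
        decide (∃ r < board.length, ∃ c < (board.headD []).length,
          winEnd board (board.headD []).length k "X" r c = true) by simp [winUpto],
      show winUpto board (board.headD []).length k "O" board.length 0 =
        decide (∃ r < board.length, ∃ c < (board.headD []).length,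
          winEnd board (board.headD []).length k "O" r c = true) by simp [winUpto]]

theorem a_eq (board : List (List String)) (k : Int) :
    check_full_board_py board k =
      (if decide (∃ r < board.length, ∃ c < (board.headD []).length,
            winStart board board.length (board.headD []).length k "X" r c) then some "X"
       else if decide (∃ r < board.length, ∃ c < (board.headD []).length,
            winStart board board.length (board.headD []).length k "O" r c) then some "O"
       else if is_board_full_py board then some "draw" else none) := by
  have hun : check_full_board_py board k =
      (match ["X", "O"].find? (fun p => aScan board k (board.length : Int)
          (if board.length > 0 then ((board.headD []).length : Int) else 0) p) with
       | some p => some p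
       | none => if is_board_full_py board then some "draw" else none) := rfl
  have hcols : (if board.length > 0 then ((board.headD []).length : Int) else 0) =
      (((board.headD []).length : Nat) : Int) := by
    cases board <;> simp
  rw [hun, hcols]
  have hX : aScan board k (board.length : Int) (((board.headD []).length : Nat) : Int) "X" =
      decide (∃ r < board.length, ∃ c < (board.headD []).length,
        winStart board board.length (board.headD []).length k "X" r c) :=
    bool_ext (by rw [aScan_iff]; simp)
  have hO : aScan board k (board.length : Int) (((board.headD []).length : Nat) : Int) "O" =
      decide (∃ r < board.length, ∃ c < (board.headD []).length,
        winStart board board.length (board.headD []).length k "O" r c) :=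
    bool_ext (by rw [aScan_iff]; simp)
  by_cases hx : (∃ r < board.length, ∃ c < (board.headD []).length,
      winStart board board.length (board.headD []).length k "X" r c)
  · rw [show List.find? (fun p => aScan board k (board.length : Int)
        (((board.headD []).length : Nat) : Int) p) ["X", "O"] = some "X" by
        rw [List.find?_cons]; simp only [hX, decide_eq_true hx]]
    show some "X" = _
    rw [if_pos (decide_eq_true hx)]
  · by_cases ho : (∃ r < board.length, ∃ c < (board.headD []).length,
        winStart board board.length (board.headD []).length k "O" r c)
    · rw [show List.find? (fun p => aScan board k (board.length : Int)
          (((board.headD []).length : Nat) : Int) p) ["X", "O"] = some "O" by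
          rw [List.find?_cons]; simp only [hX, decide_eq_false hx]
          rw [List.find?_cons]; simp only [hO, decide_eq_true ho]]
      show some "O" = _
      rw [if_neg (by rw [decide_eq_false hx]; simp), if_pos (decide_eq_true ho)]
    · rw [show List.find? (fun p => aScan board k (board.length : Int)
          (((board.headD []).length : Nat) : Int) p) ["X", "O"] = none by
          rw [List.find?_cons]; simp only [hX, decide_eq_false hx]
          rw [List.find?_cons]; simp only [hO, decide_eq_false ho]
          rfl]
      show (if is_board_full_py board then some "draw" else none) = _
      conv_rhs => rw [if_neg (by rw [decide_eq_false hx]; simp), if_neg (by rw [decide_eq_false ho]; simp)]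

-- ===== VERDICT (by name: the statement is the Claim_ definition above) =====
theorem check_full_board_py_spec : Claim_equal_check_full_board_py := by
  intro board k _ _
  unfold Spec_check_full_board_py
  rw [a_eq, alt_eq]
  rw [show is_board_full_py board = fullUpto board board.length by
        simp [fullUpto, is_board_full_py, List.take_length]]
  simp only [decide_eq_decide.mpr (winStart_exists_iff_winEnd_exists board k "X"),
             decide_eq_decide.mpr (winStart_exists_iff_winEnd_exists board k "O")]
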